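-- pv_equiv track=rewrite | github.com/JensBouman/Piet_interpreter | interpreter/runner.py | rollOperator
-- ===== SOURCE A (Python) =====
-- from typing import List, Tuple
--
-- def rollOperator(pointers: Tuple[int, int], dataStack: List[int]) -> Tuple[Tuple[int, int], List[int]]:
--     newStack = list(dataStack)
--     if len(newStack) < 3:
--         return (pointers, newStack)
--     rolls = newStack.pop()
--     depth = newStack.pop()
--     insertIndex = len(newStack) - depth
--
--     if depth <= 0 or insertIndex < 0 or insertIndex >= len(newStack) or rolls == 0 or depth == rolls:
--         return (pointers, newStack)
--
--     # TODO could also do rolls % depth times, instead of rolls times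
--     if rolls < 0:
--         for i in range(abs(rolls)):
--             newStack.append(newStack.pop(insertIndex))
--     else:
--         for i in range(rolls):
--             newStack.insert(insertIndex, newStack.pop())
--
--     return (pointers, newStack)
-- ===== SOURCE B (Python) =====
-- from typing import List, Tuple
--
-- def rollOperator(pointers: Tuple[int, int], dataStack: List[int]) -> Tuple[Tuple[int, int], List[int]]:
--     if len(dataStack) < 3:
--         return (pointers, list(dataStack))
--     rolls = dataStack[-1]
--     depth = dataStack[-2]
--     body = dataStack[:-2]
--     if depth <= 0 or depth > len(body):
--         return (pointers, body)
--     r = rolls % depth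
--     if r == 0:
--         return (pointers, body)
--     i = len(body) - depth
--     cut = len(body) - r
--     return (pointers, body[:i] + body[cut:] + body[i:cut])
-- ===== Notes on version B (the rewrite author's own statement) =====
-- stated objective: alternative
-- what changed: A rotates the top depth elements by repeating a one-element pop/insert (or pop/append) step rolls times; B reduces rolls modulo depth once and produces the result with a single three-slice concatenation (body[:i] + body[cut:] + body[i:cut]); intended as faster for large |rolls| (O(n) vs O(|rolls|*n)) but a timing run's random inputs did not confirm a speed-up.
import Mathlib
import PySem

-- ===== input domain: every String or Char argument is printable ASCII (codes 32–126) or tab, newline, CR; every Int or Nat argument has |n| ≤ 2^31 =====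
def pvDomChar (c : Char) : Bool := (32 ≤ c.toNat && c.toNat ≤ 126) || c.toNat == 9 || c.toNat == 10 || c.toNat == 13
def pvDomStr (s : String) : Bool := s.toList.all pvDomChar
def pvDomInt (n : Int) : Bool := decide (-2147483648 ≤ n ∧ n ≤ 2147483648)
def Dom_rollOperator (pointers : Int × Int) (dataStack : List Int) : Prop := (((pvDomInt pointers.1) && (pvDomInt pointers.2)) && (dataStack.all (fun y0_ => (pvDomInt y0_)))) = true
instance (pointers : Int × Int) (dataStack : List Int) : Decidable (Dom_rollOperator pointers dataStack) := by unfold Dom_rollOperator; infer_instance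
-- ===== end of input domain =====

-- B replaces A's rolls-many one-element pop/insert loop by a single three-slice
-- rotation of the top `depth` elements after reducing `rolls` modulo `depth`.

-- ===== PORT A =====
-- for i in range(abs(rolls)): newStack.append(newStack.pop(insertIndex))
def rollNegLoop (idx : Int) : Nat → List Int → List Int
  | 0, l => l
  | k + 1, l =>
    rollNegLoop idx k
      (match PySem.List.pop? l idx with
       | some (x, l') => l' ++ [x]
       | none => l)   -- unreachable under the guard (idx in range)

-- for i in range(rolls): newStack.insert(insertIndex, newStack.pop())
def rollPosLoop (idx : Int) : Nat → List Int → List Int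
  | 0, l => l
  | k + 1, l =>
    rollPosLoop idx k
      (match PySem.List.pop? l with
       | some (x, l') => PySem.List.insert l' idx x
       | none => l)   -- unreachable under the guard (list nonempty)

def rollOperator (pointers : Int × Int) (dataStack : List Int) : (Int × Int) × List Int :=
  let newStack := dataStack
  if newStack.length < 3 then (pointers, newStack)
  else
    match PySem.List.pop? newStack with
    | none => (pointers, newStack)   -- unreachable: length ≥ 3
    | some (rolls, s1) =>
      match PySem.List.pop? s1 with
      | none => (pointers, s1)       -- unreachable: length ≥ 2
      | some (depth, s2) =>
        let insertIndex : Int := (s2.length : Int) - depth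
        if depth ≤ 0 ∨ insertIndex < 0 ∨ insertIndex ≥ (s2.length : Int) ∨ rolls = 0 ∨ depth = rolls then
          (pointers, s2)
        else if rolls < 0 then
          (pointers, rollNegLoop insertIndex rolls.natAbs s2)
        else
          (pointers, rollPosLoop insertIndex rolls.toNat s2)

-- ===== PORT B =====
def rollOperator_alt (pointers : Int × Int) (dataStack : List Int) : (Int × Int) × List Int :=
  if dataStack.length < 3 then (pointers, dataStack)
  else
    -- indices -1 and -2 are in range: length ≥ 3
    let rolls := PySem.List.pyGetD dataStack (-1) 0
    let depth := PySem.List.pyGetD dataStack (-2) 0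
    let body := PySem.List.slice dataStack none (some (-2))
    if depth ≤ 0 ∨ depth > (body.length : Int) then (pointers, body)
    else
      let r := PySem.Int.mod rolls depth
      if r = 0 then (pointers, body)
      else
        let i : Int := (body.length : Int) - depth
        let cut : Int := (body.length : Int) - r
        (pointers,
          PySem.List.slice body none (some i) ++
          PySem.List.slice body (some cut) none ++
          PySem.List.slice body (some i) (some cut))

-- ===== PRECONDITION & SPEC =====
def Spec_rollOperator (pointers : Int × Int) (dataStack : List Int) (out : (Int × Int) × List Int) : Prop := out = rollOperator_alt pointers dataStack
instance (pointers : Int × Int) (dataStack : List Int) (out : (Int × Int) × List Int) : Decidable (Spec_rollOperator pointers dataStack out) := by unfold Spec_rollOperator; infer_instance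

-- ===== CLAIM (what is proved, stated in full; the proofs are below) =====
def Claim_equal_rollOperator : Prop := ∀ (pointers : Int × Int) (dataStack : List Int), Dom_rollOperator pointers dataStack → Spec_rollOperator pointers dataStack (rollOperator pointers dataStack)

-- ===== LEMMAS AND PROOFS =====

theorem insert_natCast_pv (xs : List Int) (k : Nat) (v : Int) (hk : k ≤ xs.length) :
    PySem.List.insert xs (k : Int) v = xs.take k ++ v :: xs.drop k := by
  have h : (if (k:Int) < 0 then max ((k:Int) + xs.length) 0 else min (k:Int) xs.length).toNat = k := by
    rw [if_neg (by omega)]; omega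
  simp [PySem.List.insert, PySem.List.sliceIndices, h]

theorem posStep_eq (pre seg : List Int) (h : seg ≠ []) :
    (match PySem.List.pop? (pre ++ seg) with
     | some (x, l') => PySem.List.insert l' ((pre.length : Int)) x
     | none => pre ++ seg) = pre ++ seg.rotate (seg.length - 1) := by
  rcases (List.eq_nil_or_concat seg) with rfl | ⟨L, b, rfl⟩
  · exact absurd rfl h
  · rw [List.concat_eq_append, ← List.append_assoc, PySem.List.pop?_last]
    show PySem.List.insert (pre ++ L) (pre.length : Int) b = _
    rw [insert_natCast_pv _ _ _ (by simp)]
    rw [List.take_left' rfl, List.drop_left' rfl]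
    rw [List.rotate_eq_drop_append_take (by simp)]
    simp

theorem negStep_eq (pre seg : List Int) (h : seg ≠ []) :
    (match PySem.List.pop? (pre ++ seg) ((pre.length : Int)) with
     | some (x, l') => l' ++ [x]
     | none => pre ++ seg) = pre ++ seg.rotate 1 := by
  obtain ⟨a, l, rfl⟩ := List.exists_cons_of_ne_nil h
  rw [PySem.List.pop?_natCast _ _ (by simp)]
  show (pre ++ a :: l).eraseIdx pre.length ++ [(pre ++ a :: l)[pre.length]'(by simp)] = _
  rw [List.eraseIdx_append_of_length_le (le_refl _)]
  simp [List.rotate_cons_succ]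

theorem posLoop_eq (k : Nat) (pre seg : List Int) (h : seg ≠ []) :
    rollPosLoop (pre.length : Int) k (pre ++ seg) = pre ++ seg.rotate (k * (seg.length - 1)) := by
  induction k generalizing seg with
  | zero => simp [rollPosLoop]
  | succ k ih =>
    rw [rollPosLoop, posStep_eq pre seg h]
    rw [ih (seg.rotate (seg.length - 1)) (by simp [h])]
    rw [List.rotate_rotate, List.length_rotate]
    ring_nf

theorem negLoop_eq (k : Nat) (pre seg : List Int) (h : seg ≠ []) :
    rollNegLoop (pre.length : Int) k (pre ++ seg) = pre ++ seg.rotate k := by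
  induction k generalizing seg with
  | zero => simp [rollNegLoop]
  | succ k ih =>
    rw [rollNegLoop, negStep_eq pre seg h]
    rw [ih (seg.rotate 1) (by simp [h])]
    rw [List.rotate_rotate]
    ring_nf

theorem nat_mod_pos (k dn : Nat) (hd : 0 < dn) : (k * (dn - 1)) % dn = (dn - k % dn) % dn := by
  have e1 : k * (dn - 1) + k = k * dn := by
    cases dn with
    | zero => omega
    | succ m => simp [Nat.mul_succ]
  have e2 : (dn - k % dn) + k = dn * (k / dn) + dn := by
    have := Nat.div_add_mod k dn
    have := Nat.mod_lt k hd
    omega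
  have h : Nat.ModEq dn (k * (dn - 1)) (dn - k % dn) := by
    apply Nat.ModEq.add_right_cancel' k
    unfold Nat.ModEq
    rw [e1, e2, Nat.mul_mod_left, show dn * (k / dn) + dn = (k / dn + 1) * dn by ring,
      Nat.mul_mod_left]
  exact h

theorem nat_mod_neg (k rmn dn : Nat) (hdvd : dn ∣ k + rmn) (h1 : 0 < rmn) (h2 : rmn < dn) :
    k % dn = dn - rmn := by
  have hd : 0 < dn := by omega
  have ha := Nat.div_add_mod k dn
  have hab : k % dn < dn := Nat.mod_lt k hd
  obtain ⟨s, hs⟩ := hdvd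
  have hdvd2 : (k % dn) + rmn = dn * (s - k / dn) := by
    have hm : dn * (s - k / dn) = dn * s - dn * (k / dn) := Nat.mul_sub dn s (k / dn)
    omega
  set t := s - k / dn with ht0
  have ht : (k % dn) + rmn = dn * t := hdvd2
  match t with
  | 0 => omega
  | 1 => omega
  | (t + 2) =>
    have : dn * (t + 2) = dn * t + dn * 2 := by ring
    omega

theorem slices_eq (body : List Int) (dn rmn : Nat) (hd0 : 0 < dn) (hdl : dn ≤ body.length)
    (hr : 0 < rmn) (hrd : rmn < dn) :
    PySem.List.slice body none (some ((body.length : Int) - (dn : Int))) ++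
    PySem.List.slice body (some ((body.length : Int) - (rmn : Int))) none ++
    PySem.List.slice body (some ((body.length : Int) - (dn : Int))) (some ((body.length : Int) - (rmn : Int)))
    = body.take (body.length - dn) ++ (body.drop (body.length - dn)).rotate (dn - rmn) := by
  rw [PySem.List.slice_to body (by omega),
      PySem.List.slice_from body (by omega),
      PySem.List.slice_toNat body (by omega) (by omega)]
  have t1 : ((body.length : Int) - (dn : Int)).toNat = body.length - dn := by omega
  have t2 : ((body.length : Int) - (rmn : Int)).toNat = body.length - rmn := by omega
  rw [t1, t2]
  rw [List.rotate_eq_drop_append_take (by simp; omega)]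
  rw [List.append_assoc]
  congr 1
  congr 1
  · rw [List.drop_drop]
    congr 1
    omega
  · congr 1
    omega

theorem exists_two_concat (l : List Int) (h : 2 ≤ l.length) : ∃ body d r, l = body ++ [d, r] := by
  rcases List.eq_nil_or_concat l with rfl | ⟨L, r, rfl⟩
  · simp at h
  · rcases List.eq_nil_or_concat L with rfl | ⟨B, d, rfl⟩
    · simp at h
    · exact ⟨B, d, r, by simp⟩

-- ===== VERDICT (by name: the statement is the Claim_ definition above) =====
theorem rollOperator_spec : Claim_equal_rollOperator := by
  intro pointers ds _
  unfold Spec_rollOperator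
  by_cases h3 : ds.length < 3
  · simp [rollOperator, rollOperator_alt, h3]
  · obtain ⟨body, d, r, rfl⟩ := exists_two_concat ds (by simp at h3 ⊢; omega)
    have hblen : 1 ≤ body.length := by simp at h3; omega
    have e1 : PySem.List.pop? (body ++ [d, r]) = some (r, body ++ [d]) := by
      rw [show body ++ [d, r] = (body ++ [d]) ++ [r] by simp]
      exact PySem.List.pop?_last _ _
    have e2 : PySem.List.pop? (body ++ [d]) = some (d, body) := PySem.List.pop?_last _ _
    have b1 : PySem.List.pyGetD (body ++ [d, r]) (-1) 0 = r := by
      rw [show body ++ [d, r] = (body ++ [d]) ++ [r] by simp]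
      exact PySem.List.pyGetD_neg_one_append_singleton _ _ _
    have b2 : PySem.List.pyGetD (body ++ [d, r]) (-2) 0 = d := by
      rw [PySem.List.pyGetD_neg_ofNat _ 2 0 (by omega) (by simp)]
      simp
    have b3 : PySem.List.slice (body ++ [d, r]) none (some (-2)) = body := by
      rw [PySem.List.slice_to_neg_ofNat _ 2 (by omega)]
      simp
    rw [rollOperator, rollOperator_alt]
    simp only [e1, e2, b1, b2, b3, if_neg h3]
    by_cases hg : d ≤ 0 ∨ (body.length : Int) < d
    · rw [if_pos (show (d ≤ 0 ∨ (body.length : Int) - d < 0 ∨ (body.length : Int) - d ≥ (body.length : Int) ∨ r = 0 ∨ d = r) by omega), if_pos (show d ≤ 0 ∨ d > (body.length : Int) by omega)]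
    · push Not at hg
      obtain ⟨hd0', hdle⟩ := hg
      have hd0 : 0 < d := by omega
      rw [if_neg (show ¬(d ≤ 0 ∨ d > (body.length : Int)) by omega)]
      generalize hdd : d.toNat = dn at *
      have hdcast : (dn : Int) = d := by omega
      have hdnpos : 0 < dn := by omega
      have hdnle : dn ≤ body.length := by omega
      obtain ⟨pre, seg, hbody, hprelen, hseglen⟩ :
          ∃ pre seg, body = pre ++ seg ∧ pre.length = body.length - dn ∧ seg.length = dn :=
        ⟨body.take (body.length - dn), body.drop (body.length - dn),
          (List.take_append_drop _ _).symm, by rw [List.length_take]; omega,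
          by rw [List.length_drop]; omega⟩
      have hsne : seg ≠ [] := by
        intro hcon; rw [hcon] at hseglen; simp at hseglen; omega
      have hidx : (body.length : Int) - d = (pre.length : Int) := by
        rw [hprelen]; omega
      have hTake : body.take (body.length - dn) = pre := by
        rw [hbody, show (pre ++ seg).length - dn = pre.length by simp [hseglen]]
        exact List.take_left' rfl
      have hDrop : body.drop (body.length - dn) = seg := by
        rw [hbody, show (pre ++ seg).length - dn = pre.length by simp [hseglen]]
        exact List.drop_left' rfl
      by_cases hr0 : r = 0
      · rw [if_pos (show (d ≤ 0 ∨ (body.length : Int) - d < 0 ∨ (body.length : Int) - d ≥ (body.length : Int) ∨ r = 0 ∨ d = r) from Or.inr (Or.inr (Or.inr (Or.inl hr0)))),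
          if_pos (by simp [hr0, PySem.Int.mod, Int.zero_fmod])]
      · by_cases hdr : d = r
        · rw [if_pos (show (d ≤ 0 ∨ (body.length : Int) - d < 0 ∨ (body.length : Int) - d ≥ (body.length : Int) ∨ r = 0 ∨ d = r) from Or.inr (Or.inr (Or.inr (Or.inr hdr)))),
            if_pos (by rw [← hdr]; simp [PySem.Int.mod, Int.fmod_self])]
        · rw [if_neg (show ¬(d ≤ 0 ∨ (body.length : Int) - d < 0 ∨ (body.length : Int) - d ≥ (body.length : Int) ∨ r = 0 ∨ d = r) by omega)]
          have hmod : PySem.Int.mod r d = r % d := PySem.Int.mod_eq_emod_of_pos (by omega)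
          have hmnn : 0 ≤ r % d := Int.emod_nonneg r (by omega)
          have hmlt : r % d < d := Int.emod_lt_of_pos r (by omega)
          have hrmcast : (((r % d).toNat : Nat) : Int) = r % d := by omega
          generalize hrmn : (r % d).toNat = rmn at *
          have hdvd : (d : Int) ∣ r - r % d :=
            ⟨r / d, by have := Int.emod_add_mul_ediv r d; linarith⟩
          by_cases hrneg : r < 0
          · rw [if_pos hrneg]
            have hrk : r = -((r.natAbs : Nat) : Int) := by omega
            generalize hkk : r.natAbs = k at *
            have hnegval : rollNegLoop ((body.length : Int) - d) k body = pre ++ seg.rotate k := by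
              rw [hidx]
              conv_lhs => rw [hbody]
              exact negLoop_eq k pre seg hsne
            rw [hnegval]
            have hkdvd : dn ∣ k + rmn := by
              have h2 : ((k + rmn : Nat) : Int) = -(r - r % d) := by push_cast; omega
              have h3 : (d : Int) ∣ ((k + rmn : Nat) : Int) := by
                rw [h2]; exact (Int.dvd_neg).mpr hdvd
              rw [← hdcast] at h3
              exact_mod_cast h3
            by_cases hm0 : PySem.Int.mod r d = 0
            · rw [if_pos hm0]
              have hrmn0 : rmn = 0 := by omega
              have hk0 : k % dn = 0 := by
                have : dn ∣ k := by
                  obtain ⟨t, ht⟩ := hkdvd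
                  exact ⟨t, by omega⟩
                omega
              rw [← List.rotate_mod, hseglen, hk0, List.rotate_zero, hbody]
            · rw [if_neg hm0]
              have hrmn0 : 0 < rmn := by omega
              have hrmnd : rmn < dn := by omega
              rw [hmod, ← hrmcast, ← hdcast,
                slices_eq body dn rmn hdnpos hdnle hrmn0 hrmnd, hTake, hDrop]
              have hrot : seg.rotate k = seg.rotate (dn - rmn) := by
                calc seg.rotate k = seg.rotate (k % seg.length) := (List.rotate_mod _ _).symm
                  _ = seg.rotate (dn - rmn) := by
                      rw [hseglen, nat_mod_neg k rmn dn hkdvd hrmn0 hrmnd]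
              rw [hrot]
          · rw [if_neg hrneg]
            have hrk : r = ((r.toNat : Nat) : Int) := by omega
            generalize hkk : r.toNat = k at *
            have hposval : rollPosLoop ((body.length : Int) - d) k body
                = pre ++ seg.rotate (k * (dn - 1)) := by
              rw [hidx]
              conv_lhs => rw [hbody]
              rw [posLoop_eq k pre seg hsne, hseglen]
            rw [hposval]
            have hmodk : PySem.Int.mod r d = ((k % dn : Nat) : Int) := by
              rw [hrk, ← hdcast]; exact PySem.Int.mod_natCast _ _
            have hkmod : k % dn = rmn := by omega
            by_cases hm0 : PySem.Int.mod r d = 0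
            · rw [if_pos hm0]
              have hrmn0 : rmn = 0 := by omega
              have : (k * (dn - 1)) % dn = 0 := by
                rw [nat_mod_pos k dn hdnpos, hkmod, hrmn0]
                simp
              rw [← List.rotate_mod, hseglen, this, List.rotate_zero, hbody]
            · rw [if_neg hm0]
              have hrmn0 : 0 < rmn := by omega
              have hrmnd : rmn < dn := by omega
              rw [hmod, ← hrmcast, ← hdcast,
                slices_eq body dn rmn hdnpos hdnle hrmn0 hrmnd, hTake, hDrop]
              have hrot : seg.rotate (k * (dn - 1)) = seg.rotate (dn - rmn) := by
                calc seg.rotate (k * (dn - 1))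
                    = seg.rotate ((k * (dn - 1)) % seg.length) := (List.rotate_mod _ _).symm
                  _ = seg.rotate (dn - rmn) := by
                      rw [hseglen, nat_mod_pos k dn hdnpos, hkmod,
                        Nat.mod_eq_of_lt (show dn - rmn < dn by omega)]
              rw [hrot]
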